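-- pv_equiv track=rewrite | github.com/mich704/FEM | integrals.py | punktydo3D
-- ===== SOURCE A (Python) =====
-- def getY(punkt):
--     return punkt[1]
--
-- def punktydo3D(X):
--     lp = len(X)
--     punkty = []
--
--     for i in range(0,len(X)):
--         for j in  range(0,len(X)):
--             punkty.append( [X[i], X[j]] )
--     punkty.sort()
--     punkty.sort(key=getY)
--
--     for i in range(lp, len(punkty)-lp+1):
--         if i%lp == 0:
--             punkty[i], punkty[i+lp-1] = punkty[i+lp-1], punkty[i]
--
--
--     # for i, pkt in enumerate(punkty):
--     #     if i<len(punkty)-1: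
--     #         if punkty[i][1] == punkty[i+1][1] and punkty[i][0] < punkty[i+1][0]:
--     #             punkty[i], punkty[i+1] = punkty[i+1], punkty[i]
--     return punkty
-- ===== SOURCE B (Python) =====
-- def punktydo3D(X):
--     n = len(X)
--     S = sorted(X)
--     # build the (y,x)-sorted pair list directly: for each distinct y (ascending),
--     # each x of sorted(X) contributes count(y) copies of [x, y]
--     flat = []
--     for v in sorted(set(X)):
--         c = X.count(v)
--         for x in S:
--             flat += [[x, v]] * c
--     # rebuild output chunk-wise: chunk 0 as is, later n-chunks with first/last swapped
--     out = flat[:n]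
--     for k in range(1, n):
--         a = k * n
--         out += [flat[a + n - 1]] + flat[a + 1 : a + n - 1] + [flat[a]]
--     return out
-- ===== Notes on version B (the rewrite author's own statement) =====
-- stated objective: alternative
-- what changed: Instead of building all n^2 pairs and sorting them twice (lexicographic sort, then stable sort by y), B sorts X once, emits the pairs directly in the final (y,x)-sorted order (count(v) consecutive copies of [x,v] for each distinct y-value v and each x of sorted(X)), and rebuilds the output chunk-wise with first/last of every later n-chunk swapped, instead of in-place index swaps; intended as faster (O(n^2) vs O(n^2 log n); the probe measured 3.99x at n=1024 but both time out at n=4096, so 'faster' is unconfirmed).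
-- outside the precondition, e.g. on punktydo3D([]): A raises ZeroDivisionError, B returns []
import Mathlib
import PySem

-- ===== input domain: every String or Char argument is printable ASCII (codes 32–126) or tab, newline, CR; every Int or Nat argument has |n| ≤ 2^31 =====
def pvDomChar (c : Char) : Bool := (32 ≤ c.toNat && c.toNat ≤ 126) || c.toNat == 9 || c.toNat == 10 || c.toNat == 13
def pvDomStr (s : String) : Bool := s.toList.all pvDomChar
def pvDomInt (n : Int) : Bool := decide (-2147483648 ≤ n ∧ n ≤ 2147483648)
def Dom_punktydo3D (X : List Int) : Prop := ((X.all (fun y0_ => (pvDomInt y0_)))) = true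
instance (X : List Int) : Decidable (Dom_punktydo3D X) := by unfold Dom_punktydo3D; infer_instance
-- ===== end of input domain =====

-- B builds the (y,x)-sorted pair list directly from one sort of X (instead of sorting all n^2 pairs
-- twice) and rebuilds the swapped output chunk-wise from slices instead of in-place index swaps.

-- ===== PORT A =====
def getY (punkt : List Int) : Int := PySem.List.pyGetD punkt 1 0

def punktydo3D (X : List Int) : List (List Int) :=
  let lp : Int := X.length
  let punkty : List (List Int) :=
    (PySem.List.pyRange 0 (X.length : Int) 1).foldl (fun acc i =>
      (PySem.List.pyRange 0 (X.length : Int) 1).foldl (fun acc2 j =>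
        acc2 ++ [[PySem.List.pyGetD X i 0, PySem.List.pyGetD X j 0]]) acc) []
  let punkty := PySem.List.sorted punkty (fun p => p) false
  let punkty := PySem.List.sorted punkty getY false
  (PySem.List.pyRange lp ((punkty.length : Int) - lp + 1) 1).foldl (fun acc i =>
    if PySem.Int.mod i lp == 0 then
      let u := PySem.List.pyGetD acc (i + lp - 1) []
      let v := PySem.List.pyGetD acc i []
      PySem.List.pySetD (PySem.List.pySetD acc i u) (i + lp - 1) v
    else acc) punkty

-- ===== PORT B =====
def punktydo3D_alt (X : List Int) : List (List Int) :=
  let n : Int := X.length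
  let S := PySem.List.sorted X (fun x => x) false
  let flat : List (List Int) :=
    (PySem.List.sorted (PySem.Set.ofList X) (fun v => v) false).foldl (fun acc v =>
      S.foldl (fun acc2 x =>
        acc2 ++ PySem.List.pyRepeat [[x, v]] (PySem.List.count X v : Int)) acc) []
  let out := PySem.List.slice flat none (some n)
  (PySem.List.pyRange 1 n 1).foldl (fun acc k =>
    let a := k * n
    acc ++ ([PySem.List.pyGetD flat (a + n - 1) []]
            ++ PySem.List.slice flat (some (a + 1)) (some (a + n - 1))
            ++ [PySem.List.pyGetD flat a []])) out

-- ===== PRECONDITION & SPEC =====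
-- Pre_ excludes only X = [], on which A raises ZeroDivisionError ('i % lp' with lp = 0).
def Pre_punktydo3D (X : List Int) : Prop := X ≠ []
instance (X : List Int) : Decidable (Pre_punktydo3D X) := by unfold Pre_punktydo3D; infer_instance
def pvWitness_punktydo3D : List Int := [2, 1, 1]

def Spec_punktydo3D (X : List Int) (out : List (List Int)) : Prop := out = punktydo3D_alt X
instance (X : List Int) (out : List (List Int)) : Decidable (Spec_punktydo3D X out) := by unfold Spec_punktydo3D; infer_instance

-- ===== CLAIM (what is proved, stated in full; the proofs are below) =====
def Claim_equal_punktydo3D : Prop := ∀ (X : List Int), Dom_punktydo3D X → Pre_punktydo3D X → Spec_punktydo3D X (punktydo3D X)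

-- ===== LEMMAS AND PROOFS =====

/-- x-coordinate of a pair (proof-side shorthand). -/
def pvXv (p : List Int) : Int := PySem.List.pyGetD p 0 0
/-- the (y, x) lexicographic order the final list is arranged in -/
def pvR (a b : List Int) : Prop := getY a < getY b ∨ (getY a = getY b ∧ pvXv a ≤ pvXv b)
def pvIsPair (p : List Int) : Prop := ∃ a b, p = [a, b]
/-- the raw pair list A builds -/
def pvPairs (X : List Int) : List (List Int) := X.flatMap (fun a => X.map (fun b => [a, b]))
def pvS (X : List Int) : List Int := PySem.List.sorted X (fun x => x) false
def pvD (X : List Int) : List Int := PySem.List.sorted (PySem.Set.ofList X) (fun v => v) false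
/-- the (y, x)-sorted pair list, built B's way -/
def pvF (X : List Int) : List (List Int) :=
  (pvD X).flatMap (fun v => (pvS X).flatMap (fun x => List.replicate (X.count v) [x, v]))

theorem pv_getY_pair (a b : Int) : getY [a, b] = b := rfl
theorem pv_xv_pair (a b : Int) : pvXv [a, b] = a := rfl

theorem pv_lt_pair_iff (a b c d : Int) :
    (([a, b] : List Int) < [c, d]) ↔ (a < c ∨ (a = c ∧ b < d)) := by
  constructor
  · intro h
    cases h with
    | rel h => exact Or.inl h
    | cons h => cases h with
      | rel h2 => exact Or.inr ⟨rfl, h2⟩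
      | cons h3 => cases h3
  · rintro (h | ⟨rfl, h⟩)
    · exact List.Lex.rel h
    · exact List.Lex.cons (List.Lex.rel h)

/-- Uniqueness of an R-ordered arrangement (antisymmetry only needed on members). -/
theorem pv_eq_of_perm_pairwise {α : Type} {R : α → α → Prop} :
    ∀ (l₁ l₂ : List α), l₁.Perm l₂ → l₁.Pairwise R → l₂.Pairwise R →
      (∀ a ∈ l₁, ∀ b ∈ l₁, R a b → R b a → a = b) → l₁ = l₂ := by
  intro l₁
  induction l₁ with
  | nil => intro l₂ hp _ _ _; exact (hp.nil_eq).symm ▸ rfl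
  | cons a t ih =>
    intro l₂ hp h1 h2 hanti
    cases l₂ with
    | nil => exact absurd (hp.symm.nil_eq) (by simp)
    | cons b t₂ =>
      by_cases hab : a = b
      · subst hab
        have htail : t.Perm t₂ := hp.cons_inv
        have := ih t₂ htail (List.Pairwise.of_cons h1) (List.Pairwise.of_cons h2)
          (fun x hx y hy => hanti x (List.mem_cons_of_mem _ hx) y (List.mem_cons_of_mem _ hy))
        rw [this]
      · exfalso
        have hbmem : b ∈ a :: t := hp.mem_iff.mpr (List.mem_cons_self)
        have hbt : b ∈ t := by
          cases hbmem with
          | head => exact absurd rfl (fun h => hab h.symm)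
          | tail _ h => exact h
        have hamem : a ∈ b :: t₂ := hp.mem_iff.mp (List.mem_cons_self)
        have hat : a ∈ t₂ := by
          cases hamem with
          | head => exact absurd rfl hab
          | tail _ h => exact h
        have hRab : R a b := (List.pairwise_cons.mp h1).1 b hbt
        have hRba : R b a := (List.pairwise_cons.mp h2).1 a hat
        exact hab (hanti a List.mem_cons_self b (List.mem_cons_of_mem _ hbt) hRab hRba)

/-- one insertion keeps the stable-order invariant (Int-valued key) -/
theorem pv_insertBy_stable {α : Type} (key : α → Int) (Q : α → α → Prop) (x : α) (ys : List α)
    (h : ys.Pairwise (fun a b => key a < key b ∨ (key a = key b ∧ Q a b)))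
    (hall : ∀ c ∈ ys, Q c x) :
    (PySem.List.insertBy (fun a b => decide (key a < key b)) x ys).Pairwise
      (fun a b => key a < key b ∨ (key a = key b ∧ Q a b)) := by
  induction ys with
  | nil => rw [PySem.List.insertBy]; exact List.pairwise_singleton _ _
  | cons y ys ih =>
    rw [PySem.List.insertBy]
    by_cases hxy : key x < key y
    · simp only [hxy, decide_true, if_true]
      refine List.pairwise_cons.mpr ⟨?_, h⟩
      intro z hz
      cases hz with
      | head => exact Or.inl hxy
      | tail _ hz =>
        have : key y ≤ key z := by
          rcases (List.pairwise_cons.mp h).1 z hz with h' | ⟨h', _⟩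
          · exact le_of_lt h'
          · exact le_of_eq h'
        exact Or.inl (lt_of_lt_of_le hxy this)
    · simp only [hxy, decide_false]
      refine List.pairwise_cons.mpr ⟨?_, ih (List.Pairwise.of_cons h)
        (fun c hc => hall c (List.mem_cons_of_mem _ hc))⟩
      intro z hz
      rcases (PySem.List.mem_insertBy _ x z ys).mp hz with rfl | hz'
      · rcases lt_or_eq_of_le (le_of_not_gt hxy) with h' | h'
        · exact Or.inl h'
        · exact Or.inr ⟨h', hall y List.mem_cons_self⟩
      · exact (List.pairwise_cons.mp h).1 z hz'

/-- stability of sorted: key-ties keep the input's relative order -/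
theorem pv_sorted_stable {α : Type} (key : α → Int) (Q : α → α → Prop) (L : List α)
    (hQ : L.Pairwise Q) :
    (PySem.List.sorted L key false).Pairwise
      (fun a b => key a < key b ∨ (key a = key b ∧ Q a b)) := by
  rw [PySem.List.sorted_eq_foldl_insertBy]
  suffices haux : ∀ (L : List α) (acc : List α),
      acc.Pairwise (fun a b => key a < key b ∨ (key a = key b ∧ Q a b)) →
      (∀ c ∈ acc, ∀ z ∈ L, Q c z) → L.Pairwise Q →
      (L.foldl (fun acc x => PySem.List.insertBy (fun a b => decide (key a < key b)) x acc) acc).Pairwise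
        (fun a b => key a < key b ∨ (key a = key b ∧ Q a b)) by
    exact haux L [] List.Pairwise.nil (by simp) hQ
  intro L'
  induction L' with
  | nil => intro acc h _ _; exact h
  | cons x L' ih =>
    intro acc hacc hcross hQ'
    simp only [List.foldl_cons]
    refine ih _ (pv_insertBy_stable key Q x acc hacc
      (fun c hc => hcross c hc x List.mem_cons_self)) ?_ (List.Pairwise.of_cons hQ')
    intro c hc z hz
    rcases (PySem.List.mem_insertBy _ x c acc).mp hc with rfl | hc'
    · exact (List.pairwise_cons.mp hQ').1 z hz
    · exact hcross c hc' z (List.mem_cons_of_mem _ hz)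

theorem pv_lt_pair_le {p q : List Int} (hp : pvIsPair p) (hq : pvIsPair q) (h : p < q) :
    pvXv p ≤ pvXv q := by
  obtain ⟨a, b, rfl⟩ := hp; obtain ⟨c, d, rfl⟩ := hq
  rcases (pv_lt_pair_iff a b c d).mp h with h' | ⟨h', _⟩ <;>
    simp only [pv_xv_pair] <;> omega

theorem pv_not_lt_pair_le {p q : List Int} (hp : pvIsPair p) (hq : pvIsPair q) (h : ¬ p < q) :
    pvXv q ≤ pvXv p := by
  obtain ⟨a, b, rfl⟩ := hp; obtain ⟨c, d, rfl⟩ := hq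
  rw [pv_lt_pair_iff] at h
  simp only [pv_xv_pair]
  omega

theorem pv_insertBy_lex (x : List Int) (ys : List (List Int)) (hx : pvIsPair x)
    (hys : ∀ p ∈ ys, pvIsPair p) (h : ys.Pairwise (fun a b => pvXv a ≤ pvXv b)) :
    (PySem.List.insertBy (fun a b => decide (a < b)) x ys).Pairwise
      (fun a b => pvXv a ≤ pvXv b) := by
  induction ys with
  | nil => rw [PySem.List.insertBy]; exact List.pairwise_singleton _ _
  | cons y ys ih =>
    rw [PySem.List.insertBy]
    by_cases hxy : x < y
    · simp only [hxy, decide_true, if_true]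
      refine List.pairwise_cons.mpr ⟨?_, h⟩
      intro z hz
      have h1 : pvXv x ≤ pvXv y := pv_lt_pair_le hx (hys y List.mem_cons_self) hxy
      cases hz with
      | head => exact h1
      | tail _ hz => exact le_trans h1 ((List.pairwise_cons.mp h).1 z hz)
    · simp only [hxy, decide_false]
      refine List.pairwise_cons.mpr ⟨?_, ih (fun p hp => hys p (List.mem_cons_of_mem _ hp))
        (List.Pairwise.of_cons h)⟩
      intro z hz
      rcases (PySem.List.mem_insertBy _ x z ys).mp hz with rfl | hz'
      · exact pv_not_lt_pair_le hx (hys y List.mem_cons_self) hxy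
      · exact (List.pairwise_cons.mp h).1 z hz'

/-- sorting pairs by Python list comparison makes the x-coordinates non-decreasing -/
theorem pv_sorted_lex_pairwise (L : List (List Int)) (hL : ∀ p ∈ L, pvIsPair p) :
    (PySem.List.sorted L (fun p => p) false).Pairwise (fun a b => pvXv a ≤ pvXv b) := by
  rw [PySem.List.sorted_eq_foldl_insertBy]
  suffices haux : ∀ (L' : List (List Int)) (acc : List (List Int)),
      (∀ p ∈ L', pvIsPair p) → (∀ p ∈ acc, pvIsPair p) →
      acc.Pairwise (fun a b => pvXv a ≤ pvXv b) →
      (L'.foldl (fun acc x => PySem.List.insertBy (fun a b => decide (a < b)) x acc) acc).Pairwise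
        (fun a b => pvXv a ≤ pvXv b) by
    exact haux L [] hL (by simp) List.Pairwise.nil
  intro L'
  induction L' with
  | nil => intro acc _ _ h; exact h
  | cons x L' ih =>
    intro acc hL' hacc h
    simp only [List.foldl_cons]
    refine ih _ (fun p hp => hL' p (List.mem_cons_of_mem _ hp)) ?_
      (pv_insertBy_lex x acc (hL' x List.mem_cons_self) hacc h)
    intro p hp
    rcases (PySem.List.mem_insertBy _ x p acc).mp hp with rfl | hp'
    · exact hL' p List.mem_cons_self
    · exact hacc p hp'

theorem pv_pairs_mem (X : List Int) : ∀ p ∈ pvPairs X, pvIsPair p := by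
  intro p hp
  simp only [pvPairs, List.mem_flatMap, List.mem_map] at hp
  obtain ⟨a, _, b, _, rfl⟩ := hp
  exact ⟨a, b, rfl⟩

theorem pv_F_mem (X : List Int) : ∀ p ∈ pvF X, pvIsPair p := by
  intro p hp
  simp only [pvF, List.mem_flatMap, List.mem_replicate] at hp
  obtain ⟨v, _, x, _, _, rfl⟩ := hp
  exact ⟨x, v, rfl⟩

theorem pv_sum_ite (l : List Int) (a : Int) (m : Nat) :
    (l.map (fun x => if x = a then m else 0)).sum = l.count a * m := by
  induction l with
  | nil => simp
  | cons x l ih =>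
    by_cases hx : x = a
    · subst hx
      simp only [List.map_cons, if_true, List.sum_cons, ih, List.count_cons_self]
      rw [Nat.succ_mul]
      omega
    · simp only [List.map_cons, hx, if_false, List.sum_cons, ih]
      rw [List.count_cons_of_ne hx]
      omega

theorem pv_sum_ite_nodup (l : List Int) (b : Int) (m : Nat) (h : l.Nodup) :
    (l.map (fun v => if v = b then m else 0)).sum = if b ∈ l then m else 0 := by
  induction l with
  | nil => simp
  | cons v l ih =>
    rcases List.nodup_cons.mp h with ⟨hv, hnd⟩
    by_cases hvb : v = b
    · subst hvb
      simp [ih hnd, hv]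
    · have hbv : ¬ b = v := fun h => hvb h.symm
      simp only [List.map_cons, hvb, if_false, List.sum_cons, ih hnd, List.mem_cons, hbv,
        false_or, Nat.zero_add]

theorem pv_count_pairs (X : List Int) (a b : Int) :
    (pvPairs X).count [a, b] = X.count a * X.count b := by
  unfold pvPairs
  rw [List.count_flatMap]
  have hfun : (List.count [a, b] ∘ fun a' => X.map (fun b' => [a', b']))
      = fun a' => if a' = a then X.count b else 0 := by
    funext a'
    by_cases ha' : a' = a
    · subst ha'
      simp only [Function.comp_apply, if_true]
      exact List.count_map_of_injective X (fun b' => [a', b'])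
        (fun u v h => by simpa using h) b
    · simp only [Function.comp_apply, ha', if_false]
      refine List.count_eq_zero.mpr ?_
      intro hmem
      rcases List.mem_map.mp hmem with ⟨b', _, heq⟩
      injection heq with h1 _
      exact ha' h1
  rw [hfun, pv_sum_ite]

theorem pv_count_F (X : List Int) (a b : Int) :
    (pvF X).count [a, b] = X.count a * X.count b := by
  unfold pvF
  rw [List.count_flatMap]
  have hfun : (List.count [a, b] ∘ fun v => (pvS X).flatMap (fun x => List.replicate (X.count v) [x, v]))
      = fun v => if v = b then X.count a * X.count b else 0 := by
    funext v
    by_cases hv : v = b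
    · subst hv
      simp only [Function.comp_apply, if_true]
      rw [List.count_flatMap]
      have hinner : (List.count [a, v] ∘ fun x => List.replicate (X.count v) [x, v])
          = fun x => if x = a then X.count v else 0 := by
        funext x
        simp only [Function.comp_apply, List.count_replicate]
        by_cases hx : x = a
        · subst hx; simp
        · have : ¬ ([x, v] == [a, v]) = true := by simp [hx]
          simp [this, hx]
      rw [hinner, pv_sum_ite]
      have : (pvS X).count a = X.count a := (PySem.List.sorted_perm X _ false).count_eq a
      rw [this]
    · simp only [Function.comp_apply, hv, if_false]
      refine List.count_eq_zero.mpr ?_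
      intro hmem
      rcases List.mem_flatMap.mp hmem with ⟨x, _, hrep⟩
      rcases List.mem_replicate.mp hrep with ⟨_, heq⟩
      injection heq with _ h2
      injection h2 with h3 _
      exact hv h3.symm
  rw [hfun]
  have hnd : (pvD X).Nodup :=
    (PySem.List.sorted_perm _ _ false).symm.nodup (PySem.Set.nodup_ofList X)
  rw [pv_sum_ite_nodup _ _ _ hnd]
  by_cases hb : b ∈ X
  · have : b ∈ pvD X := by
      unfold pvD
      rw [PySem.List.mem_sorted, PySem.Set.mem_ofList]
      exact hb
    simp [this]
  · have h1 : b ∉ pvD X := by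
      unfold pvD
      rw [PySem.List.mem_sorted, PySem.Set.mem_ofList]
      exact hb
    have h2 : X.count b = 0 := List.count_eq_zero.mpr hb
    simp [h1, h2]

theorem pv_perm_F_pairs (X : List Int) : (pvF X).Perm (pvPairs X) := by
  have hz : ∀ y : List Int, (∀ u v : Int, y ≠ [u, v]) →
      (pvF X).count y = (pvPairs X).count y := by
    intro y hnp
    have h1 : (pvF X).count y = 0 :=
      List.count_eq_zero.mpr (fun hm => by
        rcases pv_F_mem X _ hm with ⟨u, v, h⟩; exact hnp u v h)
    have h2 : (pvPairs X).count y = 0 :=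
      List.count_eq_zero.mpr (fun hm => by
        rcases pv_pairs_mem X _ hm with ⟨u, v, h⟩; exact hnp u v h)
    rw [h1, h2]
  rw [List.perm_iff_count]
  intro y
  rcases y with _ | ⟨a, _ | ⟨b, _ | ⟨c, t⟩⟩⟩
  · exact hz _ (by intro u v h; simp at h)
  · exact hz _ (by intro u v h; simp at h)
  · rw [pv_count_F, pv_count_pairs]
  · exact hz _ (by intro u v h; simp at h)

theorem pv_pairwise_R_F (X : List Int) : (pvF X).Pairwise pvR := by
  unfold pvF
  rw [List.flatMap_def, List.pairwise_flatten]
  constructor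
  · intro l hl
    rcases List.mem_map.mp hl with ⟨v, _, rfl⟩
    rw [List.flatMap_def, List.pairwise_flatten]
    constructor
    · intro l' hl'
      rcases List.mem_map.mp hl' with ⟨x, _, rfl⟩
      exact List.pairwise_replicate.mpr (Or.inr (Or.inr ⟨rfl, le_refl _⟩))
    · rw [List.pairwise_map]
      refine (PySem.List.sorted_pairwise X (fun x => x)).imp ?_
      intro x x' hxx' p hp q hq
      rw [List.eq_of_mem_replicate hp, List.eq_of_mem_replicate hq]
      exact Or.inr ⟨rfl, by simpa [pv_xv_pair] using hxx'⟩
  · rw [List.pairwise_map]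
    refine (PySem.List.sorted_ofList_pairwise_lt X).imp ?_
    intro v v' hvv' p hp q hq
    rcases List.mem_flatMap.mp hp with ⟨x, _, hpr⟩
    rcases List.mem_flatMap.mp hq with ⟨x', _, hqr⟩
    rw [List.eq_of_mem_replicate hpr, List.eq_of_mem_replicate hqr]
    exact Or.inl (by simpa [pv_getY_pair] using hvv')

/-- A's two stable sorts produce exactly B's directly-built list. -/
theorem pv_sorted2_eq_F (X : List Int) :
    PySem.List.sorted (PySem.List.sorted (pvPairs X) (fun p => p) false) getY false = pvF X := by
  refine pv_eq_of_perm_pairwise (R := pvR) _ _ ?_ ?_ ?_ ?_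
  · exact ((PySem.List.sorted_perm _ getY false).trans
      (PySem.List.sorted_perm _ _ false)).trans (pv_perm_F_pairs X).symm
  · exact pv_sorted_stable getY (fun a b => pvXv a ≤ pvXv b) _
      (pv_sorted_lex_pairwise (pvPairs X) (pv_pairs_mem X))
  · exact pv_pairwise_R_F X
  · intro a ha b hb hab hba
    have hap : pvIsPair a := pv_pairs_mem X a
      ((PySem.List.mem_sorted _ _ _ _).mp ((PySem.List.mem_sorted _ _ _ _).mp ha))
    have hbp : pvIsPair b := pv_pairs_mem X b
      ((PySem.List.mem_sorted _ _ _ _).mp ((PySem.List.mem_sorted _ _ _ _).mp hb))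
    obtain ⟨a1, a2, rfl⟩ := hap
    obtain ⟨b1, b2, rfl⟩ := hbp
    rcases hab with h1 | ⟨h1, h2⟩ <;> rcases hba with h3 | ⟨h3, h4⟩ <;>
      · simp only [pv_getY_pair, pv_xv_pair] at *
        simp only [List.cons.injEq, and_true]
        omega

theorem pv_map_getD_range {β : Type} (X : List Int) (f : Int → β) :
    (PySem.List.pyRange 0 (X.length : Int) 1).map (fun j => f (PySem.List.pyGetD X j 0))
      = X.map f := by
  rw [show (fun j => f (PySem.List.pyGetD X j 0))
        = f ∘ (fun j => PySem.List.pyGetD X j 0) from rfl]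
  rw [← List.map_map, PySem.List.map_pyGetD_pyRange_zero']

theorem pv_flatMap_getD_range {β : Type} (X : List Int) (g : Int → List β) :
    (PySem.List.pyRange 0 (X.length : Int) 1).flatMap (fun j => g (PySem.List.pyGetD X j 0))
      = X.flatMap g := by
  rw [List.flatMap_def, List.flatMap_def, pv_map_getD_range X g]

/-- A's nested append loop builds the raw pair list. -/
theorem pv_build_eq_pairs (X : List Int) :
    (PySem.List.pyRange 0 (X.length : Int) 1).foldl (fun acc i =>
      (PySem.List.pyRange 0 (X.length : Int) 1).foldl (fun acc2 j =>
        acc2 ++ [[PySem.List.pyGetD X i 0, PySem.List.pyGetD X j 0]]) acc) []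
    = pvPairs X := by
  have h1 : ∀ (acc : List (List Int)) (i : Int),
      (PySem.List.pyRange 0 (X.length : Int) 1).foldl (fun acc2 j =>
        acc2 ++ [[PySem.List.pyGetD X i 0, PySem.List.pyGetD X j 0]]) acc
      = acc ++ X.map (fun b => [PySem.List.pyGetD X i 0, b]) := by
    intro acc i
    rw [PySem.List.foldl_append_singleton_eq_map
      (f := fun j => [PySem.List.pyGetD X i 0, PySem.List.pyGetD X j 0])]
    congr 1
    exact pv_map_getD_range X (fun b => [PySem.List.pyGetD X i 0, b])
  have h2 := PySem.List.foldl_congr_mem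
    (l := PySem.List.pyRange 0 (X.length : Int) 1) (init := ([] : List (List Int)))
    (f := fun acc i => (PySem.List.pyRange 0 (X.length : Int) 1).foldl (fun acc2 j =>
        acc2 ++ [[PySem.List.pyGetD X i 0, PySem.List.pyGetD X j 0]]) acc)
    (g := fun acc i => acc ++ X.map (fun b => [PySem.List.pyGetD X i 0, b]))
    (fun acc x _ => h1 acc x)
  rw [h2]
  rw [PySem.List.foldl_append_eq_flatMap
    (g := fun i => X.map (fun b => [PySem.List.pyGetD X i 0, b]))]
  rw [List.nil_append]
  exact pv_flatMap_getD_range X (fun a => X.map (fun b => [a, b]))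

theorem pv_length_pairs (X : List Int) : (pvPairs X).length = X.length * X.length := by
  simp [pvPairs, List.length_flatMap, List.map_const', List.sum_replicate, smul_eq_mul]

theorem pv_chunk_filter (k n : Nat) (hn : 1 ≤ n) :
    (PySem.List.pyRange ((k * n : Nat) : Int) ((k * n : Nat) + (n : Int)) 1).filter
      (fun i => PySem.Int.mod i (n : Int) == 0) = [((k * n : Nat) : Int)] := by
  have h0 : (0 : Int) < (n : Int) := by exact_mod_cast hn
  rw [PySem.List.pyRange_one_cons (by omega)]
  rw [List.filter_cons]
  have hp : ((PySem.Int.mod ((k * n : Nat) : Int) (n : Int) == 0)) = true := by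
    rw [beq_iff_eq, PySem.Int.mod_eq_zero_iff_dvd]
    exact ⟨(k : Int), by push_cast; ring⟩
  rw [hp]
  simp only [if_true]
  congr 1
  refine List.filter_eq_nil_iff.mpr ?_
  intro i hi
  rw [PySem.List.mem_pyRange_one] at hi
  simp only [beq_iff_eq]
  rw [PySem.Int.mod_eq_zero_iff_dvd]
  rintro ⟨q, rfl⟩
  push_cast at hi
  have hk1 : (k : Int) < q := by
    have h1 : (n : Int) * (k : Int) < (n : Int) * q := by linarith [hi.1]
    exact lt_of_mul_lt_mul_left h1 (le_of_lt h0)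
  have hk2 : q < (k : Int) + 1 := by
    have h2 : (n : Int) * q < (n : Int) * ((k : Int) + 1) := by linarith [hi.2]
    exact lt_of_mul_lt_mul_left h2 (le_of_lt h0)
  omega

theorem pv_filter_range (n : Nat) (hn : 1 ≤ n) :
    ∀ (d k m : Nat), k + d = m + 1 →
    (PySem.List.pyRange ((k * n : Nat) : Int) ((m * n + 1 : Nat) : Int) 1).filter
      (fun i => PySem.Int.mod i (n : Int) == 0)
    = (PySem.List.pyRange (k : Int) ((m + 1 : Nat) : Int) 1).map (· * (n : Int)) := by
  intro d
  induction d with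
  | zero =>
    intro k m hkm
    have hk : k = m + 1 := by omega
    subst hk
    rw [PySem.List.pyRange_one_eq_nil (by push_cast; nlinarith),
        PySem.List.pyRange_one_eq_nil (by push_cast; omega)]
    simp
  | succ d ih =>
    intro k m hkm
    by_cases hkm2 : k = m
    · subst hkm2
      have he1 : ((k * n + 1 : Nat) : Int) = ((k * n : Nat) : Int) + 1 := by push_cast; ring
      rw [he1, PySem.List.pyRange_one_singleton]
      rw [List.filter_cons]
      have hp : ((PySem.Int.mod ((k * n : Nat) : Int) (n : Int) == 0)) = true := by
        rw [beq_iff_eq, PySem.Int.mod_eq_zero_iff_dvd]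
        exact ⟨(k : Int), by push_cast; ring⟩
      rw [hp]
      have he2 : ((k + 1 : Nat) : Int) = (k : Int) + 1 := by push_cast; ring
      rw [he2, PySem.List.pyRange_one_singleton]
      simp only [if_true, List.filter_nil, List.map_cons, List.map_nil]
      congr 1
    · have hklt : k < m := by omega
      have h0 : (0 : Int) < (n : Int) := by exact_mod_cast hn
      have hsplit := PySem.List.pyRange_one_append ((k * n : Nat) : Int)
        (((k + 1) * n : Nat) : Int) ((m * n + 1 : Nat) : Int)
        (by push_cast; nlinarith)
        (by exact_mod_cast Nat.le_succ_of_le (Nat.mul_le_mul_right n (by omega)))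
      rw [hsplit, List.filter_append]
      have hc : (PySem.List.pyRange ((k * n : Nat) : Int) (((k + 1) * n : Nat) : Int) 1).filter
          (fun i => PySem.Int.mod i (n : Int) == 0) = [((k * n : Nat) : Int)] := by
        have he : (((k + 1) * n : Nat) : Int) = ((k * n : Nat) : Int) + (n : Int) := by
          push_cast; ring
        rw [he]
        exact pv_chunk_filter k n hn
      rw [hc, ih (k + 1) m (by omega)]
      have hsplit2 := PySem.List.pyRange_one_append (k : Int) ((k + 1 : Nat) : Int)
        ((m + 1 : Nat) : Int) (by push_cast; omega) (by push_cast; omega)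
      rw [hsplit2, List.map_append]
      have he2 : ((k + 1 : Nat) : Int) = (k : Int) + 1 := by push_cast; ring
      rw [he2, PySem.List.pyRange_one_singleton]
      simp only [List.map_cons, List.map_nil]
      congr 2

theorem pv_getD_skeleton (flat O : List (List Int)) (p j : Nat) (hO : O.length = p)
    (hj : p ≤ j) (hjlen : j < flat.length) :
    (O ++ flat.drop p).getD j [] = flat.getD j [] := by
  have hlen : (O ++ flat.drop p).length = flat.length := by
    simp [List.length_append, hO]
    omega
  rw [List.getD_eq_getElem _ _ (by omega), List.getD_eq_getElem _ _ hjlen]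
  rw [List.getElem_append_right (by omega)]
  rw [List.getElem_drop]
  congr 1
  omega

theorem pv_set_chunk (T : List (List Int)) (n : Nat) (hn : 2 ≤ n) (hT : n ≤ T.length) :
    (T.set 0 (T.getD (n - 1) [])).set (n - 1) (T.getD 0 []) =
    [T.getD (n - 1) []] ++ (T.drop 1).take (n - 2) ++ [T.getD 0 []] ++ T.drop n := by
  cases T with
  | nil => simp at hT; omega
  | cons t0 T' =>
    have h1 : (t0 :: T').getD 0 [] = t0 := List.getD_cons_zero
    rw [h1]
    have h2 : n - 1 = (n - 2) + 1 := by omega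
    have h3 : (t0 :: T').set 0 ((t0 :: T').getD (n - 1) []) = ((t0 :: T').getD (n - 1) []) :: T' := rfl
    rw [h3, h2, List.set_cons_succ]
    have h4 : T'.set (n - 2) t0 = T'.take (n - 2) ++ t0 :: T'.drop (n - 2 + 1) := by
      rw [List.set_eq_take_append_cons_drop]
      have : n - 2 < T'.length := by simp at hT ⊢; omega
      simp [this]
    rw [h4]
    have h5 : (t0 :: T').drop n = T'.drop (n - 2 + 1) := by
      conv_lhs => rw [show n = (n - 2 + 1) + 1 by omega]
      rw [List.drop_succ_cons]
    rw [h5]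
    have h6 : (t0 :: T').drop 1 = T' := rfl
    rw [h6]
    simp [List.append_assoc]

theorem pv_swap_step (flat O : List (List Int)) (n m : Nat) (hn2 : 2 ≤ n)
    (hlen : flat.length = n * n) (hO : O.length = m * n) (hm1 : m + 1 ≤ n) (hm : 1 ≤ m) :
    (PySem.List.pySetD
      (PySem.List.pySetD (O ++ flat.drop (m * n)) ((m : Int) * (n : Int))
        (PySem.List.pyGetD (O ++ flat.drop (m * n)) ((m : Int) * (n : Int) + (n : Int) - 1) []))
      ((m : Int) * (n : Int) + (n : Int) - 1)
      (PySem.List.pyGetD (O ++ flat.drop (m * n)) ((m : Int) * (n : Int)) []))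
    = (O ++ ([PySem.List.pyGetD flat ((m : Int) * (n : Int) + (n : Int) - 1) []]
        ++ PySem.List.slice flat (some ((m : Int) * (n : Int) + 1)) (some ((m : Int) * (n : Int) + (n : Int) - 1))
        ++ [PySem.List.pyGetD flat ((m : Int) * (n : Int)) []])) ++ flat.drop ((m + 1) * n) := by
  have hmn : m * n + n ≤ n * n := by
    have h := Nat.mul_le_mul_right n hm1
    rw [Nat.succ_mul] at h
    exact h
  have e1 : ((m : Int) * (n : Int)) = ((m * n : Nat) : Int) := by push_cast; ring
  have e2 : ((m : Int) * (n : Int) + (n : Int) - 1) = ((m * n + n - 1 : Nat) : Int) := by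
    push_cast [Nat.cast_sub (by omega : 1 ≤ m * n + n)]; ring
  have e3 : ((m : Int) * (n : Int) + 1) = ((m * n + 1 : Nat) : Int) := by push_cast; ring
  rw [e2, e3, e1]
  rw [PySem.List.pyGetD_natCast, PySem.List.pyGetD_natCast, PySem.List.pyGetD_natCast,
      PySem.List.pyGetD_natCast, PySem.List.pySetD_natCast, PySem.List.pySetD_natCast]
  rw [pv_getD_skeleton flat O (m * n) (m * n + n - 1) hO (by omega) (by omega)]
  rw [pv_getD_skeleton flat O (m * n) (m * n) hO (by omega) (by omega)]
  -- move the two writes under the O ++ · skeleton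
  have hs1 : (O ++ flat.drop (m * n)).set (m * n) (flat.getD (m * n + n - 1) [])
      = O ++ (flat.drop (m * n)).set 0 (flat.getD (m * n + n - 1) []) := by
    rw [List.set_append]
    simp [hO]
  rw [hs1]
  have hs2 : (O ++ (flat.drop (m * n)).set 0 (flat.getD (m * n + n - 1) [])).set
        (m * n + n - 1) (flat.getD (m * n) [])
      = O ++ ((flat.drop (m * n)).set 0 (flat.getD (m * n + n - 1) [])).set
        (n - 1) (flat.getD (m * n) []) := by
    rw [List.set_append]
    have : ¬ (m * n + n - 1 < O.length) := by omega
    simp only [this, if_false]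
    congr 2
    omega
  rw [hs2]
  -- identify the chunk values with drop-relative ones
  set T := flat.drop (m * n) with hT
  have hTlen : T.length = n * n - m * n := by simp [hT, hlen]
  have hg1 : flat.getD (m * n + n - 1) [] = T.getD (n - 1) [] := by
    rw [List.getD_eq_getElem _ _ (by omega), List.getD_eq_getElem _ _ (by omega)]
    simp only [hT, List.getElem_drop]
    congr 1
    omega
  have hg2 : flat.getD (m * n) [] = T.getD 0 [] := by
    rw [List.getD_eq_getElem _ _ (by omega), List.getD_eq_getElem _ _ (by omega)]
    simp only [hT, List.getElem_drop]
    congr 1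
  rw [hg1, hg2]
  rw [pv_set_chunk T n hn2 (by omega)]
  -- and the slice
  have hslice : PySem.List.slice flat (some ((m * n + 1 : Nat) : Int)) (some ((m * n + n - 1 : Nat) : Int))
      = (T.drop 1).take (n - 2) := by
    rw [PySem.List.slice_toNat flat (by positivity) (by positivity)]
    simp only [Int.toNat_natCast]
    rw [hT, List.drop_drop]
    congr 1
    omega
  rw [hslice, ← hg1, ← hg2]
  have hdrop : T.drop n = flat.drop ((m + 1) * n) := by
    rw [hT, List.drop_drop]
    congr 1
    rw [Nat.succ_mul]
  rw [hdrop]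
  simp [List.append_assoc]

/-- the in-place first/last chunk swaps equal the chunk-wise rebuild -/
theorem pv_phase3 (flat : List (List Int)) (n : Nat) (hn : 1 ≤ n)
    (hlen : flat.length = n * n) :
    (PySem.List.pyRange 1 (n : Int) 1).foldl (fun acc k =>
      PySem.List.pySetD
        (PySem.List.pySetD acc (k * (n : Int)) (PySem.List.pyGetD acc (k * (n : Int) + (n : Int) - 1) []))
        (k * (n : Int) + (n : Int) - 1) (PySem.List.pyGetD acc (k * (n : Int)) [])) flat
    = (PySem.List.pyRange 1 (n : Int) 1).foldl (fun acc k =>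
        acc ++ ([PySem.List.pyGetD flat (k * (n : Int) + (n : Int) - 1) []]
                ++ PySem.List.slice flat (some (k * (n : Int) + 1)) (some (k * (n : Int) + (n : Int) - 1))
                ++ [PySem.List.pyGetD flat (k * (n : Int)) []]))
        (PySem.List.slice flat none (some (n : Int))) := by
  have hslice0 : PySem.List.slice flat none (some (n : Int)) = flat.take n := by
    rw [PySem.List.slice_to flat (by positivity)]
    simp
  by_cases hn1 : n = 1
  · subst hn1
    simp only [Nat.cast_one] at hslice0 ⊢
    rw [PySem.List.pyRange_one_eq_nil (le_refl 1)]
    simp only [List.foldl_nil]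
    rw [hslice0, List.take_of_length_le (by omega)]
  · have hn2 : 2 ≤ n := by omega
    suffices hinv : ∀ m : Nat, 1 ≤ m → m ≤ n →
        ((PySem.List.pyRange 1 (m : Int) 1).foldl (fun acc k =>
          PySem.List.pySetD
            (PySem.List.pySetD acc (k * (n : Int)) (PySem.List.pyGetD acc (k * (n : Int) + (n : Int) - 1) []))
            (k * (n : Int) + (n : Int) - 1) (PySem.List.pyGetD acc (k * (n : Int)) [])) flat
         = (PySem.List.pyRange 1 (m : Int) 1).foldl (fun acc k =>
            acc ++ ([PySem.List.pyGetD flat (k * (n : Int) + (n : Int) - 1) []]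
                    ++ PySem.List.slice flat (some (k * (n : Int) + 1)) (some (k * (n : Int) + (n : Int) - 1))
                    ++ [PySem.List.pyGetD flat (k * (n : Int)) []]))
            (PySem.List.slice flat none (some (n : Int))) ++ flat.drop (m * n))
        ∧ ((PySem.List.pyRange 1 (m : Int) 1).foldl (fun acc k =>
            acc ++ ([PySem.List.pyGetD flat (k * (n : Int) + (n : Int) - 1) []]
                    ++ PySem.List.slice flat (some (k * (n : Int) + 1)) (some (k * (n : Int) + (n : Int) - 1))
                    ++ [PySem.List.pyGetD flat (k * (n : Int)) []]))
            (PySem.List.slice flat none (some (n : Int)))).length = m * n by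
      obtain ⟨h1, _⟩ := hinv n hn (le_refl n)
      have hdz : flat.drop (n * n) = [] := by
        rw [← hlen]
        exact List.drop_length
      rw [h1, hdz, List.append_nil]
    intro m
    induction m with
    | zero => intro h; omega
    | succ m ih =>
      intro _ hm1n
      by_cases hm0 : m = 0
      · subst hm0
        have : ((0 + 1 : Nat) : Int) = 1 := by norm_num
        rw [this, PySem.List.pyRange_one_eq_nil (le_refl 1)]
        simp only [List.foldl_nil]
        constructor
        · rw [hslice0]
          simp only [zero_add, one_mul]
          exact (List.take_append_drop n flat).symm
        · rw [hslice0]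
          simp only [zero_add, one_mul, List.length_take, hlen]
          exact Nat.min_eq_left (Nat.le_mul_of_pos_left n (by omega))
      · have hm : 1 ≤ m := by omega
        obtain ⟨hA, hBlen⟩ := ih hm (by omega)
        have hrange : PySem.List.pyRange 1 ((m + 1 : Nat) : Int) 1
            = PySem.List.pyRange 1 (m : Int) 1 ++ [(m : Int)] := by
          have he : ((m + 1 : Nat) : Int) = (m : Int) + 1 := by push_cast; ring
          rw [he, PySem.List.pyRange_one_succ_right (by exact_mod_cast hm)]
        rw [hrange, List.foldl_append, List.foldl_append]
        simp only [List.foldl_cons, List.foldl_nil]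
        rw [hA]
        have hstep := pv_swap_step flat _ n m hn2 hlen hBlen (by omega) hm
        constructor
        · rw [hstep]
        · have hmn : m * n + n ≤ n * n := by
            have h := Nat.mul_le_mul_right n hm1n
            rw [Nat.succ_mul] at h
            exact h
          have hd : (PySem.List.slice flat (some ((m : Int) * (n : Int) + 1))
              (some ((m : Int) * (n : Int) + (n : Int) - 1))).length = n - 2 := by
            rw [show ((m : Int) * (n : Int) + (n : Int) - 1) = ((m * n + n - 1 : Nat) : Int) by
                  push_cast [Nat.cast_sub (by omega : 1 ≤ m * n + n)]; ring,
                show ((m : Int) * (n : Int) + 1) = ((m * n + 1 : Nat) : Int) by push_cast; ring]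
            rw [PySem.List.slice_toNat flat (by positivity) (by positivity)]
            simp only [Int.toNat_natCast, List.length_take, List.length_drop, hlen]
            omega
          simp only [List.length_append, List.length_cons, List.length_nil, hBlen, hd]
          rw [Nat.succ_mul]
          omega

theorem pv_flat_eq (X : List Int) :
    (PySem.List.sorted (PySem.Set.ofList X) (fun v => v) false).foldl (fun acc v =>
      (PySem.List.sorted X (fun x => x) false).foldl (fun acc2 x =>
        acc2 ++ PySem.List.pyRepeat [[x, v]] ((PySem.List.count X v : Nat) : Int)) acc) []
    = pvF X := by
  have h1 : ∀ (acc : List (List Int)) (v : Int),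
      (PySem.List.sorted X (fun x => x) false).foldl (fun acc2 x =>
        acc2 ++ PySem.List.pyRepeat [[x, v]] ((PySem.List.count X v : Nat) : Int)) acc
      = acc ++ (pvS X).flatMap (fun x => List.replicate (X.count v) [x, v]) := by
    intro acc v
    rw [PySem.List.foldl_append_eq_flatMap
      (g := fun x => PySem.List.pyRepeat [[x, v]] ((PySem.List.count X v : Nat) : Int))]
    congr 1
    have hfn : (fun x => PySem.List.pyRepeat [[x, v]] ((PySem.List.count X v : Nat) : Int))
        = fun x => List.replicate (X.count v) [x, v] := by
      funext x
      rw [PySem.List.pyRepeat_singleton, Int.toNat_natCast, PySem.List.count_eq]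
    rw [hfn]
    rfl
  have h2 := PySem.List.foldl_congr_mem
    (l := PySem.List.sorted (PySem.Set.ofList X) (fun v => v) false)
    (init := ([] : List (List Int)))
    (f := fun acc v => (PySem.List.sorted X (fun x => x) false).foldl (fun acc2 x =>
        acc2 ++ PySem.List.pyRepeat [[x, v]] ((PySem.List.count X v : Nat) : Int)) acc)
    (g := fun acc v => acc ++ (pvS X).flatMap (fun x => List.replicate (X.count v) [x, v]))
    (fun acc x _ => h1 acc x)
  rw [h2]
  rw [PySem.List.foldl_append_eq_flatMap
    (g := fun v => (pvS X).flatMap (fun x => List.replicate (X.count v) [x, v]))]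
  rw [List.nil_append]
  rfl

-- ===== VERDICT (by name: the statement is the Claim_ definition above) =====
theorem punktydo3D_spec : Claim_equal_punktydo3D := by
  intro X _ hpre
  show punktydo3D X = punktydo3D_alt X
  have hn : 1 ≤ X.length := List.length_pos_iff.mpr hpre
  simp only [punktydo3D, punktydo3D_alt]
  rw [pv_build_eq_pairs X, pv_sorted2_eq_F X, pv_flat_eq X]
  have hlenF : (pvF X).length = X.length * X.length := by
    rw [(pv_perm_F_pairs X).length_eq, pv_length_pairs]
  rw [hlenF]
  have hnn : X.length ≤ X.length * X.length := Nat.le_mul_of_pos_left _ (by omega)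
  have hbound : ((X.length * X.length : Nat) : Int) - (X.length : Int) + 1
      = (((X.length - 1) * X.length + 1 : Nat) : Int) := by
    rw [Nat.sub_mul, one_mul]
    push_cast [Nat.cast_sub hnn]
    ring
  rw [hbound]
  rw [PySem.List.foldl_if_eq_foldl_filter
    (p := fun i => PySem.Int.mod i ((X.length : Nat) : Int) == 0)
    (f := fun acc i =>
      PySem.List.pySetD
        (PySem.List.pySetD acc i (PySem.List.pyGetD acc (i + ((X.length : Nat) : Int) - 1) []))
        (i + ((X.length : Nat) : Int) - 1) (PySem.List.pyGetD acc i []))]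
  have hfilt := pv_filter_range X.length hn (X.length - 1) 1 (X.length - 1) (by omega)
  simp only [one_mul, Nat.cast_one] at hfilt
  rw [show X.length - 1 + 1 = X.length from by omega] at hfilt
  rw [hfilt]
  rw [List.foldl_map]
  exact pv_phase3 (pvF X) X.length hn hlenF
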